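-- pv_equiv track=rewrite | github.com/ashuksmile/ML | TextDNA/src/data_loader.py | _normalize_skill_text
-- ===== SOURCE A (Python) =====
-- def _normalize_skill_text(value: str) -> str:
--     if not isinstance(value, str) or not value.strip():
--         return ""
--     if ";" in value:
--         parts = value.split(";")
--     elif "," in value:
--         parts = value.split(",")
--     else:
--         parts = [value]
--     clean = sorted({p.strip().lower() for p in parts if p.strip()})
--     return ";".join(clean)
-- ===== SOURCE B (Python) =====
-- def _insert_unique(ordered, t):
--     """Insert t into its position in a strictly increasing list; drop it if already present."""
--     if not ordered:
--         return [t]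
--     h = ordered[0]
--     if t < h:
--         return [t] + ordered
--     if t == h:
--         return ordered
--     return [h] + _insert_unique(ordered[1:], t)
--
--
-- def _normalize_skill_text(value: str) -> str:
--     if not isinstance(value, str) or not value.strip():
--         return ""
--     if ";" in value:
--         parts = value.split(";")
--     elif "," in value:
--         parts = value.split(",")
--     else:
--         parts = [value]
--     ordered = []
--     for p in parts:
--         t = p.strip().lower()
--         if t:
--             ordered = _insert_unique(ordered, t)
--     return ";".join(ordered)
-- ===== Notes on version B (the rewrite author's own statement) =====
-- stated objective: alternative
-- what changed: Replaces A's build-a-set-then-sort pipeline by a single pass that never sorts and never builds a set: each normalized token is placed by ordered insertion into a strictly increasing unique list (insertion dropped on an equal element), which is joined directly.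
import Mathlib
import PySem

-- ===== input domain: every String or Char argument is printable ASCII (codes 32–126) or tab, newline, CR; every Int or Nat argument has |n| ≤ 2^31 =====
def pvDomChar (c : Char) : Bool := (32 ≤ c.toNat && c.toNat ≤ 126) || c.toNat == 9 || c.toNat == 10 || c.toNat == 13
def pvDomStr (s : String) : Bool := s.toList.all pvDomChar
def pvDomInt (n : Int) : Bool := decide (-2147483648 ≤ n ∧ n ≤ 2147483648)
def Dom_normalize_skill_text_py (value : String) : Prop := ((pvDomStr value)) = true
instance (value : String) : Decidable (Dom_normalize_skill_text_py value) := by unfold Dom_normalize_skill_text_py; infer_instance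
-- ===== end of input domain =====

-- B never builds a set and never sorts: each token is placed by ordered insertion into a
-- strictly increasing unique list (objective: alternative decomposition, same result).

-- ===== PORT A =====
-- s.split(sep) with a nonempty literal sep: split? is always `some` there, getD never fires
def pvSplit (s sep : String) : List String := (PySem.Str.split? s sep).getD []

def normalize_skill_text_py (value : String) : String :=
  if PySem.Str.strip value == "" then ""
  else
    let parts :=
      if PySem.Str.isIn ";" value then pvSplit value ";"
      else if PySem.Str.isIn "," value then pvSplit value ","
      else [value]
    let clean := PySem.List.sorted
      (PySem.Set.ofList ((parts.filter (fun p => PySem.Str.strip p != "")).map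
        (fun p => PySem.Str.lower (PySem.Str.strip p)))) (fun x => x) false
    PySem.Str.join ";" clean

-- ===== PORT B =====
-- _insert_unique: insert t into a strictly increasing list, dropping it on an equal element
def pvInsertUnique : List String → String → List String
  | [], t => [t]
  | h :: rest, t =>
    if t < h then t :: h :: rest
    else if t == h then h :: rest
    else h :: pvInsertUnique rest t

def normalize_skill_text_py_alt (value : String) : String :=
  if PySem.Str.strip value == "" then ""
  else
    let parts :=
      if PySem.Str.isIn ";" value then pvSplit value ";"
      else if PySem.Str.isIn "," value then pvSplit value ","
      else [value]
    let ordered := parts.foldl (fun ordered p =>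
      let t := PySem.Str.lower (PySem.Str.strip p)
      if t != "" then pvInsertUnique ordered t else ordered) []
    PySem.Str.join ";" ordered

-- ===== PRECONDITION & SPEC =====
def Spec_normalize_skill_text_py (value : String) (out : String) : Prop := out = normalize_skill_text_py_alt value
instance (value : String) (out : String) : Decidable (Spec_normalize_skill_text_py value out) := by unfold Spec_normalize_skill_text_py; infer_instance

-- ===== CLAIM (what is proved, stated in full; the proofs are below) =====
def Claim_equal_normalize_skill_text_py : Prop := ∀ (value : String), Dom_normalize_skill_text_py value → Spec_normalize_skill_text_py value (normalize_skill_text_py value)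

-- ===== LEMMAS AND PROOFS =====

-- the loop body of port B, named for the proofs
def pvStep (ordered : List String) (p : String) : List String :=
  if PySem.Str.lower (PySem.Str.strip p) != "" then
    pvInsertUnique ordered (PySem.Str.lower (PySem.Str.strip p))
  else ordered

lemma pvMem_insertUnique (l : List String) (t y : String) :
    y ∈ pvInsertUnique l t ↔ y = t ∨ y ∈ l := by
  induction l with
  | nil => simp [pvInsertUnique]
  | cons h rest ih =>
    simp only [pvInsertUnique]
    split_ifs with h1 h2
    · simp
    · rw [beq_iff_eq] at h2
      subst h2
      simp only [List.mem_cons]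
      tauto
    · simp only [List.mem_cons, ih]
      tauto

lemma pvPairwise_insertUnique (l : List String) (t : String) (hl : l.Pairwise (· < ·)) :
    (pvInsertUnique l t).Pairwise (· < ·) := by
  induction l with
  | nil => simp [pvInsertUnique]
  | cons h rest ih =>
    rw [List.pairwise_cons] at hl
    obtain ⟨hh, hrest⟩ := hl
    simp only [pvInsertUnique]
    split_ifs with h1 h2
    · rw [List.pairwise_cons]
      refine ⟨?_, List.pairwise_cons.mpr ⟨hh, hrest⟩⟩
      intro b hb
      rcases List.mem_cons.mp hb with rfl | hb'
      · exact h1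
      · exact lt_trans h1 (hh b hb')
    · exact List.pairwise_cons.mpr ⟨hh, hrest⟩
    · have h2' : t ≠ h := by simpa using h2
      rw [List.pairwise_cons]
      refine ⟨?_, ih hrest⟩
      intro b hb
      rcases (pvMem_insertUnique rest t b).mp hb with rfl | hb'
      · exact lt_of_le_of_ne (not_lt.mp h1) (Ne.symm h2')
      · exact hh b hb'
  
-- lower s is empty only for the empty string (lower maps characters one to one)
lemma pvLower_empty_iff (s : String) : (PySem.Str.lower s = "") ↔ s = "" := by
  constructor
  · intro h
    have h1 : (PySem.Str.lower s).toList = [] := by rw [h]; rfl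
    rw [PySem.Str.toList_lower] at h1
    have h2 : s.toList = [] := by
      cases hs : s.toList with
      | nil => rfl
      | cons c cs => rw [hs] at h1; simp [PySem.Chars.lower] at h1
    exact String.toList_injective (by simp [h2])
  · intro h; rw [h]; rfl

-- the ordered-insertion fold: strictly increasing output whose members are exactly the
-- normalized nonempty tokens of the processed parts (plus the accumulator's)
lemma pvFold_spec (parts : List String) (acc : List String) (hacc : acc.Pairwise (· < ·)) :
    (parts.foldl pvStep acc).Pairwise (· < ·) ∧
    ∀ y, y ∈ parts.foldl pvStep acc ↔
      y ∈ acc ∨ y ∈ (parts.filter (fun p => PySem.Str.strip p != "")).map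
        (fun p => PySem.Str.lower (PySem.Str.strip p)) := by
  induction parts generalizing acc with
  | nil => exact ⟨hacc, by simp⟩
  | cons p rest ih =>
    rw [List.foldl_cons]
    by_cases h : PySem.Str.strip p = ""
    · have hlow : PySem.Str.lower (PySem.Str.strip p) = "" := by rw [h]; rfl
      have hstep : pvStep acc p = acc := by
        simp only [pvStep, hlow]
        simp
      have hfil : (p :: rest).filter (fun p => PySem.Str.strip p != "")
          = rest.filter (fun p => PySem.Str.strip p != "") := by
        simp [h]
      rw [hstep, hfil]
      exact ih acc hacc
    · have hne : PySem.Str.lower (PySem.Str.strip p) ≠ "" :=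
        fun hc => h ((pvLower_empty_iff _).mp hc)
      have hb : (PySem.Str.lower (PySem.Str.strip p) != "") = true := by
        simpa [bne_iff_ne] using hne
      have hstep : pvStep acc p = pvInsertUnique acc (PySem.Str.lower (PySem.Str.strip p)) := by
        rw [pvStep, if_pos hb]
      have hfil : (p :: rest).filter (fun p => PySem.Str.strip p != "")
          = p :: rest.filter (fun p => PySem.Str.strip p != "") := by
        simp [h]
      rw [hstep, hfil, List.map_cons]
      obtain ⟨h1, h2⟩ := ih (pvInsertUnique acc (PySem.Str.lower (PySem.Str.strip p)))
        (pvPairwise_insertUnique acc _ hacc)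
      refine ⟨h1, fun y => ?_⟩
      rw [h2 y, pvMem_insertUnique, or_assoc]
      simp only [List.mem_cons]
      exact or_left_comm

-- the core: sorting the deduped tokens (A) equals the ordered-insertion result (B)
lemma pvSorted_set_eq_fold (parts : List String) :
    PySem.List.sorted
      (PySem.Set.ofList ((parts.filter (fun p => PySem.Str.strip p != "")).map
        (fun p => PySem.Str.lower (PySem.Str.strip p)))) (fun x => x) false
    = parts.foldl pvStep [] := by
  obtain ⟨hpw, hmem⟩ := pvFold_spec parts [] List.Pairwise.nil
  apply PySem.List.sorted_eq_of_perm_of_pairwise_lt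
  · rw [List.perm_ext_iff_of_nodup hpw.nodup (PySem.Set.nodup_ofList _)]
    intro y
    rw [hmem y, PySem.Set.mem_ofList]
    simp
  · exact hpw

-- ===== VERDICT (by name: the statement is the Claim_ definition above) =====
theorem normalize_skill_text_py_spec : Claim_equal_normalize_skill_text_py := by
  intro value _
  unfold Spec_normalize_skill_text_py normalize_skill_text_py normalize_skill_text_py_alt
  by_cases hg : (PySem.Str.strip value == "") = true
  · simp [hg]
  · have h' : (PySem.Str.strip value == "") = false := by simpa using hg
    simp only [h', Bool.false_eq_true, if_false]
    exact congrArg (PySem.Str.join ";") (pvSorted_set_eq_fold _)
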